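-- pv_equiv track=rewrite | github.com/kevin622/algo_only | boj/1450_냅색문제.py | subset
-- ===== SOURCE A (Python) =====
-- def subset(arr: list, max_sum: int):
--     result = []
--     for i in range(1 << len(arr)):
--         sub_sum = 0
--         is_over = False
--         for j in range(len(arr)):
--             if i & (1 << j):
--                 sub_sum += arr[j]
--                 if sub_sum > max_sum:
--                     is_over = True
--                     break
--         if not is_over:
--             result.append(sub_sum)
--     result.sort()
--     return result
-- ===== SOURCE B (Python) =====
-- def subset(arr: list, max_sum: int):
--     # Incremental doubling: keep a sorted list of sums of "valid" subsets of the
--     # prefix seen so far (valid = every running prefix-sum stays <= max_sum, which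
--     # is exactly what A's early break enforces); extend by each element and merge.
--     sums = [0]
--     for a in arr:
--         shifted = [s + a for s in sums if s + a <= max_sum]
--         merged = []
--         i = j = 0
--         while i < len(sums) and j < len(shifted):
--             if sums[i] <= shifted[j]:
--                 merged.append(sums[i]); i += 1
--             else:
--                 merged.append(shifted[j]); j += 1
--         merged.extend(sums[i:])
--         merged.extend(shifted[j:])
--         sums = merged
--     return sums
-- ===== Notes on version B (the rewrite author's own statement) =====
-- stated objective: alternative
-- what changed: Replaces A's enumeration of all 2^n bitmasks (recomputing each subset's running sum from scratch with an early break, then sorting) by incremental doubling: keep the sorted list of valid subset sums of the prefix processed so far, extend it by each element with a threshold filter, and combine with a linear merge of sorted lists, so no final sort is needed.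
import Mathlib
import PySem

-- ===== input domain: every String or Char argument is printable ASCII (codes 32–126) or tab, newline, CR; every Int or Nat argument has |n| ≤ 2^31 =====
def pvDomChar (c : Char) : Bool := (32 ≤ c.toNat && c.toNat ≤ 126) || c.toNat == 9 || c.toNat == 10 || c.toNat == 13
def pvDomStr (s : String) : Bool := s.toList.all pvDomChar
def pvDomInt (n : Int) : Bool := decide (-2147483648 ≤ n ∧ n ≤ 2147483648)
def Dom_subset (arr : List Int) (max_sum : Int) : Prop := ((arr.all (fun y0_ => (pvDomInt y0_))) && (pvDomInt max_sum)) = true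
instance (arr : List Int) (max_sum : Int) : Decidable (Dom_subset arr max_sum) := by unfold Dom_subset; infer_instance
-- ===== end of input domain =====

-- B replaces A's enumeration of all 2^n bitmasks (re-summing each subset from scratch,
-- then sorting) by an incremental doubling of the sorted list of valid subset sums with
-- a threshold filter and a linear merge, so no final sort is needed.

-- ===== PORT A =====
-- Inner loop 'for j in range(len(arr)): if i & (1 << j): ...'; the break is encoded by
-- freezing the state once is_over is set.  'i & (1 << j)' truthiness is ported by hand
-- as Nat.testBit i j, and 'range(1 << len(arr))' as List.range (2 ^ arr.length): exact,
-- since i ranges exactly over the nonnegative integers 0 .. 2^len(arr)-1.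
def subsetInner (arr : List Int) (max_sum : Int) (i : Nat) : Int × Bool :=
  (List.range arr.length).foldl
    (fun st j =>
      if st.2 then st
      else if i.testBit j then
        let s := st.1 + PySem.List.pyGetD arr (j : Int) 0
        if s > max_sum then (s, true) else (s, false)
      else st)
    (0, false)

def subset (arr : List Int) (max_sum : Int) : List Int :=
  PySem.List.sorted
    ((List.range (2 ^ arr.length)).foldl
      (fun result i =>
        let st := subsetInner arr max_sum i
        if !st.2 then result ++ [st.1] else result)
      [])
    (fun x => x)

-- ===== PORT B =====
-- Source B's hand-written two-pointer merge of two sorted lists is List.merge (the same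
-- recursion: take the smaller head, append the leftover tail).
def subset_alt (arr : List Int) (max_sum : Int) : List Int :=
  arr.foldl
    (fun sums a =>
      sums.merge ((sums.filter (fun s => s + a ≤ max_sum)).map (fun s => s + a))
        (fun x y => decide (x ≤ y)))
    [0]

-- ===== PRECONDITION & SPEC =====
def Spec_subset (arr : List Int) (max_sum : Int) (out : List Int) : Prop := out = subset_alt arr max_sum
instance (arr : List Int) (max_sum : Int) (out : List Int) : Decidable (Spec_subset arr max_sum out) := by unfold Spec_subset; infer_instance

-- ===== CLAIM (what is proved, stated in full; the proofs are below) =====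
def Claim_equal_subset : Prop := ∀ (arr : List Int) (max_sum : Int), Dom_subset arr max_sum → Spec_subset arr max_sum (subset arr max_sum)

-- ===== LEMMAS AND PROOFS =====

-- A's unsorted result list.
def rawA (arr : List Int) (max_sum : Int) : List Int :=
  (List.range (2 ^ arr.length)).foldl
    (fun result i =>
      let st := subsetInner arr max_sum i
      if !st.2 then result ++ [st.1] else result)
    []

theorem subset_eq_sorted_rawA (arr : List Int) (max_sum : Int) :
    subset arr max_sum = PySem.List.sorted (rawA arr max_sum) (fun x => x) := rfl

theorem rawA_eq_filter_map (arr : List Int) (max_sum : Int) :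
    rawA arr max_sum =
      ((List.range (2 ^ arr.length)).filter (fun i => !(subsetInner arr max_sum i).2)).map
        (fun i => (subsetInner arr max_sum i).1) := by
  unfold rawA
  simpa using PySem.List.foldl_append_if
    (fun i => !(subsetInner arr max_sum i).2)
    (fun i => (subsetInner arr max_sum i).1)
    (List.range (2 ^ arr.length)) []

theorem pyGetD_append_low (arr : List Int) (a : Int) {j : Nat} (hj : j < arr.length) :
    PySem.List.pyGetD (arr ++ [a]) (j : Int) 0 = PySem.List.pyGetD arr (j : Int) 0 := by
  simp [PySem.List.pyGetD_natCast, List.getD_eq_getElem?_getD, List.getElem?_append_left hj]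

theorem inner_snoc_low (arr : List Int) (a max_sum : Int) {i : Nat}
    (hi : i < 2 ^ arr.length) :
    subsetInner (arr ++ [a]) max_sum i = subsetInner arr max_sum i := by
  unfold subsetInner
  rw [List.length_append, List.length_singleton, List.range_succ, List.foldl_append]
  have hcong : (List.range arr.length).foldl
      (fun (st : Int × Bool) j =>
        if st.2 then st
        else if i.testBit j then
          let s := st.1 + PySem.List.pyGetD (arr ++ [a]) (j : Int) 0
          if s > max_sum then (s, true) else (s, false)
        else st) (0, false) =
      (List.range arr.length).foldl
      (fun (st : Int × Bool) j =>
        if st.2 then st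
        else if i.testBit j then
          let s := st.1 + PySem.List.pyGetD arr (j : Int) 0
          if s > max_sum then (s, true) else (s, false)
        else st) (0, false) := by
    apply PySem.List.foldl_congr_mem
    intro acc j hj
    rw [List.mem_range] at hj
    simp only [pyGetD_append_low arr a hj]
  rw [hcong]
  simp [Nat.testBit_lt_two_pow hi]

theorem pyGetD_append_last (arr : List Int) (a : Int) :
    PySem.List.pyGetD (arr ++ [a]) (arr.length : Int) 0 = a := by
  simp [PySem.List.pyGetD_natCast, List.getD_eq_getElem?_getD]

theorem inner_snoc_high (arr : List Int) (a max_sum : Int) {i : Nat}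
    (hi : i < 2 ^ arr.length) :
    subsetInner (arr ++ [a]) max_sum (2 ^ arr.length + i) =
      (if (subsetInner arr max_sum i).2 then subsetInner arr max_sum i
       else if (subsetInner arr max_sum i).1 + a > max_sum then
         ((subsetInner arr max_sum i).1 + a, true)
       else ((subsetInner arr max_sum i).1 + a, false)) := by
  unfold subsetInner
  rw [List.length_append, List.length_singleton, List.range_succ, List.foldl_append]
  have hcong : (List.range arr.length).foldl
      (fun (st : Int × Bool) j =>
        if st.2 then st
        else if (2 ^ arr.length + i).testBit j then
          let s := st.1 + PySem.List.pyGetD (arr ++ [a]) (j : Int) 0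
          if s > max_sum then (s, true) else (s, false)
        else st) (0, false) =
      (List.range arr.length).foldl
      (fun (st : Int × Bool) j =>
        if st.2 then st
        else if i.testBit j then
          let s := st.1 + PySem.List.pyGetD arr (j : Int) 0
          if s > max_sum then (s, true) else (s, false)
        else st) (0, false) := by
    apply PySem.List.foldl_congr_mem
    intro acc j hj
    rw [List.mem_range] at hj
    simp only [pyGetD_append_low arr a hj, Nat.testBit_two_pow_add_gt hj]
  rw [hcong]
  have hbit : (2 ^ arr.length + i).testBit arr.length = true := by
    rw [Nat.testBit_two_pow_add_eq, Nat.testBit_lt_two_pow hi]; rfl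
  simp only [List.foldl_cons, List.foldl_nil, hbit, pyGetD_append_last]
  rcases h : (List.range arr.length).foldl
      (fun (st : Int × Bool) j =>
        if st.2 then st
        else if i.testBit j then
          let s := st.1 + PySem.List.pyGetD arr (j : Int) 0
          if s > max_sum then (s, true) else (s, false)
        else st) (0, false) with ⟨s, ov⟩
  cases ov <;> simp

theorem rawA_snoc (arr : List Int) (a max_sum : Int) :
    rawA (arr ++ [a]) max_sum =
      rawA arr max_sum ++
        ((rawA arr max_sum).filter (fun s => s + a ≤ max_sum)).map (fun s => s + a) := by
  rw [rawA_eq_filter_map, rawA_eq_filter_map]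
  have hlen : (arr ++ [a]).length = arr.length + 1 := by simp
  rw [hlen, pow_succ, mul_two, List.range_add, List.filter_append, List.map_append]
  congr 1
  · -- low half: masks without the new top bit
    have hf : List.filter (fun i => !(subsetInner (arr ++ [a]) max_sum i).2)
        (List.range (2 ^ arr.length)) =
        List.filter (fun i => !(subsetInner arr max_sum i).2)
        (List.range (2 ^ arr.length)) := by
      apply List.filter_congr
      intro i hi
      rw [List.mem_range] at hi
      rw [inner_snoc_low arr a max_sum hi]
    rw [hf]
    apply List.map_congr_left
    intro i hi
    rw [List.mem_filter, List.mem_range] at hi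
    rw [inner_snoc_low arr a max_sum hi.1]
  · -- high half: masks with the new top bit
    rw [List.filter_map, List.map_map, List.filter_map, List.map_map, List.filter_filter]
    simp only [Function.comp_def]
    have hfilt : List.filter
        (fun x => !(subsetInner (arr ++ [a]) max_sum (2 ^ arr.length + x)).2)
        (List.range (2 ^ arr.length)) =
        List.filter
        (fun i => decide ((subsetInner arr max_sum i).1 + a ≤ max_sum) &&
          !(subsetInner arr max_sum i).2)
        (List.range (2 ^ arr.length)) := by
      apply List.filter_congr
      intro i hi
      rw [List.mem_range] at hi
      simp only [inner_snoc_high arr a max_sum hi]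
      rcases h : subsetInner arr max_sum i with ⟨s, ov⟩
      cases ov <;> by_cases hle : s + a ≤ max_sum <;>
        simp [hle, lt_iff_not_ge]
    rw [hfilt]
    apply List.map_congr_left
    intro i hi
    rw [List.mem_filter, List.mem_range] at hi
    obtain ⟨hi, hcond⟩ := hi
    simp only [Bool.and_eq_true, Bool.not_eq_true', decide_eq_true_eq] at hcond
    simp only [inner_snoc_high arr a max_sum hi, hcond.2, if_false, Bool.false_eq_true]
    rw [if_neg (by omega)]

theorem alt_snoc (arr : List Int) (a max_sum : Int) :
    subset_alt (arr ++ [a]) max_sum =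
      (subset_alt arr max_sum).merge
        (((subset_alt arr max_sum).filter (fun s => s + a ≤ max_sum)).map (fun s => s + a))
        (fun x y => decide (x ≤ y)) := by
  simp [subset_alt, List.foldl_append]

theorem alt_perm_sorted (arr : List Int) (max_sum : Int) :
    (subset_alt arr max_sum).Perm (rawA arr max_sum) ∧
      (subset_alt arr max_sum).Pairwise (· ≤ ·) := by
  induction arr using List.reverseRecOn with
  | nil =>
      constructor
      · have h2 : rawA [] max_sum = [0] := rfl
        rw [h2]; exact List.Perm.refl _
      · exact List.pairwise_singleton _ _
  | append_singleton arr a ih =>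
      obtain ⟨hperm, hsorted⟩ := ih
      have hshift : (((subset_alt arr max_sum).filter (fun s => s + a ≤ max_sum)).map
          (fun s => s + a)).Pairwise (· ≤ ·) :=
        (hsorted.filter _).map _ (fun x y h => by omega)
      constructor
      · rw [alt_snoc, rawA_snoc]
        exact (List.merge_perm_append _).trans (hperm.append ((hperm.filter _).map _))
      · rw [alt_snoc]
        exact hsorted.merge hshift

-- ===== VERDICT (by name: the statement is the Claim_ definition above) =====
theorem subset_spec : Claim_equal_subset := by
  intro arr max_sum _
  unfold Spec_subset
  rw [subset_eq_sorted_rawA]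
  obtain ⟨hperm, hsorted⟩ := alt_perm_sorted arr max_sum
  exact PySem.List.sorted_id_eq_of_perm_of_pairwise _ _ hperm hsorted
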